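-- pv_equiv track=rewrite | github.com/tonnyTyuring/checkers | superai2.py | skan
-- ===== SOURCE A (Python) =====
-- def skan(pole):  # подсчёт пешек на поле
--     s_i = 0
--     s_k = 0
--     for i in range(8):
--         for ii in pole[i]:
--             if ii == 1: s_i += 1
--             if ii == 2: s_i += 3
--             if ii == 3: s_k += 1
--             if ii == 4: s_k += 3
--     return s_k, s_i
-- ===== SOURCE B (Python) =====
-- def skan(pole):  # flatten the 8 board rows, then four library count scans combined in closed form
--     cells = [v for i in range(8) for v in pole[i]]
--     return (cells.count(3) + 3 * cells.count(4),
--             cells.count(1) + 3 * cells.count(2))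
-- ===== Notes on version B (the rewrite author's own statement) =====
-- stated objective: idiomatic
-- what changed: B has no accumulator loop at all: it flattens the 8 board rows into one cell list and computes both weighted sums from four list.count scans combined in closed form, instead of A's single pass with four per-cell if-branches updating two running sums.
import Mathlib
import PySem

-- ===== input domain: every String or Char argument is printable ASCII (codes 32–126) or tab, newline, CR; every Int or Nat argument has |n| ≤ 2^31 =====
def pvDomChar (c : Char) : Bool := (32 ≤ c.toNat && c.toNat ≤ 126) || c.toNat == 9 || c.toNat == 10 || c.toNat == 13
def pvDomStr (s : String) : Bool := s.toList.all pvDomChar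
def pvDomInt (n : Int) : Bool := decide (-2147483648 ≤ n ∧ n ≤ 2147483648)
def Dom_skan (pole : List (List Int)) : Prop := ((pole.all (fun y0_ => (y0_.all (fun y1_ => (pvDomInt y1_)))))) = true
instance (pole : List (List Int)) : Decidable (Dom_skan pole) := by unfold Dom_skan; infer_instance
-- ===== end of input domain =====

-- B flattens the first 8 rows into one cell list and computes both weighted sums from four
-- list.count scans in closed form, instead of A's per-cell four-branch accumulation (objective: idiomatic).


-- ===== PORT A =====
def skan (pole : List (List Int)) : Int × Int :=
  -- for i in range(8): for ii in pole[i]: four independent ifs; state (s_i, s_k)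
  let st := (PySem.List.pyRange 0 8 1).foldl
    (fun (st : Int × Int) i =>
      (PySem.List.pyGetD pole i []).foldl
        (fun (st : Int × Int) ii =>
          let si := if ii = 1 then st.1 + 1 else st.1
          let si := if ii = 2 then si + 3 else si
          let sk := if ii = 3 then st.2 + 1 else st.2
          let sk := if ii = 4 then sk + 3 else sk
          (si, sk)) st) (0, 0)
  (st.2, st.1)

-- ===== PORT B =====
def skan_alt (pole : List (List Int)) : Int × Int :=
  -- cells = [v for i in range(8) for v in pole[i]]
  let cells := (PySem.List.pyRange 0 8 1).flatMap (fun i => PySem.List.pyGetD pole i [])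
  (PySem.List.count cells 3 + 3 * PySem.List.count cells 4,
   PySem.List.count cells 1 + 3 * PySem.List.count cells 2)

-- ===== PRECONDITION & SPEC =====
-- A indexes pole[0]..pole[7]; it returns exactly when the board has at least 8 rows.
def Pre_skan (pole : List (List Int)) : Prop := 8 ≤ pole.length
instance (pole : List (List Int)) : Decidable (Pre_skan pole) := by unfold Pre_skan; infer_instance
def pvWitness_skan : List (List Int) := [[1,2],[3],[4],[],[0,5],[1],[2],[3,4]]

def Spec_skan (pole : List (List Int)) (out : Int × Int) : Prop := out = skan_alt pole
instance (pole : List (List Int)) (out : Int × Int) : Decidable (Spec_skan pole out) := by unfold Spec_skan; infer_instance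

-- ===== CLAIM (what is proved, stated in full; the proofs are below) =====
def Claim_equal_skan : Prop := ∀ (pole : List (List Int)), Dom_skan pole → Pre_skan pole → Spec_skan pole (skan pole)

-- ===== LEMMAS AND PROOFS =====

-- A's inner loop over one row adds the weighted counts of that row to the running pair.
theorem skan_inner_row (row : List Int) (st : Int × Int) :
    row.foldl
      (fun (st : Int × Int) ii =>
        let si := if ii = 1 then st.1 + 1 else st.1
        let si := if ii = 2 then si + 3 else si
        let sk := if ii = 3 then st.2 + 1 else st.2
        let sk := if ii = 4 then sk + 3 else sk
        (si, sk)) st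
    = (st.1 + row.count 1 + 3 * row.count 2, st.2 + row.count 3 + 3 * row.count 4) := by
  induction row generalizing st with
  | nil => simp
  | cons x xs ih =>
    rw [List.foldl_cons, ih]
    simp only [List.count_cons, Prod.mk.injEq]
    constructor <;> (split_ifs with h1 h2 <;> simp_all <;> ring)

-- A's outer loop over a list of rows (fed row by row) sums the weighted counts of the flattened rows.
theorem skan_rows (rows : List (List Int)) (st : Int × Int) :
    rows.foldl
      (fun (st : Int × Int) row =>
        row.foldl
          (fun (st : Int × Int) ii =>
            let si := if ii = 1 then st.1 + 1 else st.1
            let si := if ii = 2 then si + 3 else si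
            let sk := if ii = 3 then st.2 + 1 else st.2
            let sk := if ii = 4 then sk + 3 else sk
            (si, sk)) st) st
    = (st.1 + (rows.flatMap id).count 1 + 3 * (rows.flatMap id).count 2,
       st.2 + (rows.flatMap id).count 3 + 3 * (rows.flatMap id).count 4) := by
  induction rows generalizing st with
  | nil => simp
  | cons r rs ih =>
    rw [List.foldl_cons, skan_inner_row r st, ih]
    simp only [List.flatMap_cons, List.count_append, Prod.mk.injEq, id]
    push_cast
    constructor <;> ring

-- A's index loop over range(8) is the row loop over pole.take 8 (all indices in range under Pre_).
theorem skan_range_take {β : Type} (pole : List (List Int)) (h : 8 ≤ pole.length)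
    (g : β → List Int → β) (st : β) :
    (PySem.List.pyRange 0 8 1).foldl (fun st i => g st (PySem.List.pyGetD pole i [])) st
    = (pole.take 8).foldl g st := by
  have hlen : (pole.take 8).length = 8 := by simp [List.length_take]; omega
  have key := PySem.List.foldl_pyRange_zero_pyGetD' (pole.take 8) ([] : List Int) g st
  rw [show (((pole.take 8).length : Int)) = 8 by exact_mod_cast hlen] at key
  rw [← key]
  apply PySem.List.foldl_congr_mem
  intro acc i hi
  have hmem := (PySem.List.mem_pyRange_one).1 hi
  have h0 : (0:Int) ≤ i := hmem.1
  have h8 : i < (8:Int) := hmem.2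
  congr 1
  rw [PySem.List.pyGetD_eq_getElem pole ([] : List Int) h0 (by omega),
      PySem.List.pyGetD_eq_getElem (pole.take 8) ([] : List Int) h0 (by simp [hlen]; omega)]
  simp [List.getElem_take]

-- B's flattening comprehension yields the cells of pole.take 8 (all indices in range under Pre_).
theorem cells_eq (pole : List (List Int)) (h : 8 ≤ pole.length) :
    (PySem.List.pyRange 0 8 1).flatMap (fun i => PySem.List.pyGetD pole i [])
    = (pole.take 8).flatMap id := by
  have h1 := PySem.List.foldl_append_eq_flatMap
    (fun i => PySem.List.pyGetD pole i []) (PySem.List.pyRange 0 8 1) ([] : List Int)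
  have h2 := PySem.List.foldl_append_eq_flatMap (fun r => r) (pole.take 8) ([] : List Int)
  have h3 := skan_range_take pole h (fun (acc : List Int) row => acc ++ row) []
  simp only [List.nil_append] at h1 h2
  rw [← h1, h3, h2]
  rfl

-- ===== VERDICT (by name: the statement is the Claim_ definition above) =====
theorem skan_spec : Claim_equal_skan := by
  intro pole _ hpre
  unfold Spec_skan skan skan_alt
  rw [skan_range_take pole hpre, skan_rows, cells_eq pole hpre]
  simp only [PySem.List.count_eq, Prod.mk.injEq]
  constructor <;> ring
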